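-- pv_equiv track=rewrite | github.com/medic/cht-ai-tools | skills/cht-form-builder/scripts/parse-xlsform.py | get_localized_values
-- ===== SOURCE A (Python) =====
-- from typing import Any
--
-- def get_column_index(headers: list[str], *column_names: str) -> int | None:
--     """
--     Find the index of a column by trying multiple possible names.
--     Returns None if not found.
--     """
--     headers_lower = [str(h).strip().lower() if h else '' for h in headers]
--     for name in column_names:
--         name_lower = name.lower()
--         if name_lower in headers_lower:
--             return headers_lower.index(name_lower)
--     return None
--
-- def get_localized_values(row: list[Any], headers: list[str], base_name: str, languages: list[str]) -> dict[str, str]: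
--     """
--     Extract localized values for a field (e.g., label::fr, label::en).
--     Returns a dict with language codes as keys.
--     """
--     values = {}
--     headers_lower = [str(h).strip().lower() if h else '' for h in headers]
--
--     # First try language-specific columns
--     for lang in languages:
--         col_name = f"{base_name}::{lang}"
--         if col_name in headers_lower:
--             idx = headers_lower.index(col_name)
--             if idx < len(row) and row[idx]:
--                 values[lang] = str(row[idx]).strip()
--
--     # If no language-specific values found, try the base column
--     if not values:
--         base_idx = get_column_index(headers, base_name)
--         if base_idx is not None and base_idx < len(row) and row[base_idx]:
--             # Use 'default' as key when no language specified
--             values['default'] = str(row[base_idx]).strip()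
--
--     return values
-- ===== SOURCE B (Python) =====
-- from typing import Any
--
-- def get_localized_values(row: list[Any], headers: list[str], base_name: str, languages: list[str]) -> dict[str, str]:
--     """
--     Extract localized values for a field (e.g., label::fr, label::en).
--     Header-driven: one pass over the headers resolves every language at its
--     first matching 'base::lang' column; the result dict is then emitted in
--     language order.  The base-column fallback is a single break-on-first-match
--     scan of the headers.
--     """
--     target_to_lang = {f"{base_name}::{lang}": lang for lang in languages}
--     found = {}
--     resolved = set()
--     for idx, h in enumerate(headers):
--         key = str(h).strip().lower() if h else ''
--         lang = target_to_lang.get(key)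
--         if lang is not None and lang not in resolved:
--             resolved.add(lang)
--             if idx < len(row) and row[idx]:
--                 found[lang] = str(row[idx]).strip()
--
--     values = {lang: found[lang] for lang in languages if lang in found}
--
--     if not values:
--         base_lower = base_name.lower()
--         for idx, h in enumerate(headers):
--             if (str(h).strip().lower() if h else '') == base_lower:
--                 if idx < len(row) and row[idx]:
--                     values['default'] = str(row[idx]).strip()
--                 break
--
--     return values
-- ===== Notes on version B (the rewrite author's own statement) =====
-- stated objective: faster
-- what changed: B inverts the loop structure: instead of A's per-language membership scan plus .index() scan over the headers, B maps each target 'base::lang' header to its language once and makes a single header-driven pass that resolves every language at its first matching column, then emits the dict in language order; the base-column fallback is a single break-on-first-match scan.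
import Mathlib
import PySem

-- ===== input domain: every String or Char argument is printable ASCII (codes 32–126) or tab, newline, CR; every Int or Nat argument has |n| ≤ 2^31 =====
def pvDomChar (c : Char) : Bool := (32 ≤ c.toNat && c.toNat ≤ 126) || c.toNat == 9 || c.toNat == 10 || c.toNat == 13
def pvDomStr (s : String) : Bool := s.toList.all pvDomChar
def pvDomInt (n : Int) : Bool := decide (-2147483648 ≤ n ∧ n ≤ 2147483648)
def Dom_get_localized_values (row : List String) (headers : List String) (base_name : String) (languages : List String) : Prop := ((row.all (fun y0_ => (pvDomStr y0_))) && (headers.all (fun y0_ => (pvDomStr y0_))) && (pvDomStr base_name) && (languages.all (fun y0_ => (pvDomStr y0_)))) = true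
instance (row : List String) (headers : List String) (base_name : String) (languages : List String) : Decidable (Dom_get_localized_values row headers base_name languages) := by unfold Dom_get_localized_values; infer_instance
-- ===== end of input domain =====

-- B inverts A's loop structure: a single header-driven pass resolves every language
-- at its first matching 'base::lang' column (objective: faster).

-- `str(h).strip().lower() if h else ''` (the header normalisation both Pythons perform)
def pvNorm (h : String) : String :=
  if h = "" then "" else PySem.Str.lower (PySem.Str.strip h)

-- ===== PORT A =====
-- `for name in column_names: …` of get_column_index
def pvGciLoop (headers_lower : List String) : List String → Option Nat
  | [] => none
  | name :: rest =>
    let name_lower := PySem.Str.lower name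
    if headers_lower.contains name_lower then
      PySem.List.index? headers_lower name_lower
    else pvGciLoop headers_lower rest

def get_column_index (headers : List String) (column_names : List String) : Option Nat :=
  pvGciLoop (headers.map pvNorm) column_names

def get_localized_values (row : List String) (headers : List String) (base_name : String) (languages : List String) : List (String × String) :=
  let headers_lower := headers.map pvNorm
  let values : PySem.Dict String String := languages.foldl (fun values lang =>
    let col_name := base_name ++ "::" ++ lang
    if headers_lower.contains col_name then
      match PySem.List.index? headers_lower col_name with
      | some idx =>
        if idx < row.length ∧ PySem.List.pyGetD row (idx : Int) "" ≠ "" then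
          values.insert lang (PySem.Str.strip (PySem.List.pyGetD row (idx : Int) ""))
        else values
      | none => values
    else values) PySem.Dict.empty
  let values :=
    if values.items.isEmpty then
      match get_column_index headers [base_name] with
      | some base_idx =>
        if base_idx < row.length ∧ PySem.List.pyGetD row (base_idx : Int) "" ≠ "" then
          values.insert "default" (PySem.Str.strip (PySem.List.pyGetD row (base_idx : Int) ""))
        else values
      | none => values
    else values
  values.items

-- ===== PORT B =====
-- body of B's header pass: `lang = target_to_lang.get(key); if lang is not None and
-- lang not in resolved: resolved.add(lang); if idx < len(row) and row[idx]: found[lang] = …`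
def pvHdrStep (row : List String) (tl : PySem.Dict String String)
    (st : PySem.Dict String String × PySem.Set String) (p : Int × String) :
    PySem.Dict String String × PySem.Set String :=
  match tl.get? (pvNorm p.2) with
  | some lang =>
    if st.2.contains lang then st
    else
      (if p.1 < (row.length : Int) ∧ PySem.List.pyGetD row p.1 "" ≠ "" then
         st.1.insert lang (PySem.Str.strip (PySem.List.pyGetD row p.1 ""))
       else st.1,
       PySem.Set.add st.2 lang)
  | none => st

-- B's fallback `for idx, h in enumerate(headers): if norm(h) == base_lower: … ; break`
def pvFbLoop (row : List String) (base_lower : String) : List (Int × String) → Option String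
  | [] => none
  | p :: rest =>
    if pvNorm p.2 = base_lower then
      if p.1 < (row.length : Int) ∧ PySem.List.pyGetD row p.1 "" ≠ "" then
        some (PySem.Str.strip (PySem.List.pyGetD row p.1 ""))
      else none
    else pvFbLoop row base_lower rest

def get_localized_values_alt (row : List String) (headers : List String) (base_name : String) (languages : List String) : List (String × String) :=
  let target_to_lang : PySem.Dict String String :=
    languages.foldl (fun d lang => d.insert (base_name ++ "::" ++ lang) lang) PySem.Dict.empty
  let st := (PySem.List.enumerate headers 0).foldl (pvHdrStep row target_to_lang)
    (PySem.Dict.empty, PySem.Set.empty)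
  let found := st.1
  let values : PySem.Dict String String := languages.foldl (fun d lang =>
    match found.get? lang with
    | some v => d.insert lang v
    | none => d) PySem.Dict.empty
  let values :=
    if values.items.isEmpty then
      match pvFbLoop row (PySem.Str.lower base_name) (PySem.List.enumerate headers 0) with
      | some v => values.insert "default" v
      | none => values
    else values
  values.items

-- ===== PRECONDITION & SPEC =====
def Spec_get_localized_values (row : List String) (headers : List String) (base_name : String) (languages : List String) (out : List (String × String)) : Prop := out = get_localized_values_alt row headers base_name languages
instance (row : List String) (headers : List String) (base_name : String) (languages : List String) (out : List (String × String)) : Decidable (Spec_get_localized_values row headers base_name languages out) := by unfold Spec_get_localized_values; infer_instance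

-- ===== CLAIM (what is proved, stated in full; the proofs are below) =====
def Claim_equal_get_localized_values : Prop := ∀ (row : List String) (headers : List String) (base_name : String) (languages : List String), Dom_get_localized_values row headers base_name languages → Spec_get_localized_values row headers base_name languages (get_localized_values row headers base_name languages)

-- the key `base_name ++ "::" ++ lang` determines lang
theorem pvKeyInj {base l1 l2 : String} (h : base ++ "::" ++ l1 = base ++ "::" ++ l2) : l1 = l2 :=
  (String.append_right_inj _).mp h

-- every binding of B's target_to_lang maps `base ++ "::" ++ l` to l
theorem pvTl_sound (base : String) (ls : List String) (d : PySem.Dict String String)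
    (hd : ∀ k l, d.get? k = some l → k = base ++ "::" ++ l) :
    ∀ k l, (ls.foldl (fun d lang => d.insert (base ++ "::" ++ lang) lang) d).get? k = some l →
      k = base ++ "::" ++ l := by
  induction ls generalizing d with
  | nil => exact hd
  | cons x rest ih =>
    rw [List.foldl_cons]
    refine ih _ (fun k l hk => ?_)
    by_cases h : k = base ++ "::" ++ x
    · subst h; rw [PySem.Dict.get?_insert_self] at hk
      cases hk; rfl
    · rw [PySem.Dict.get?_insert_of_ne _ _ h] at hk
      exact hd k l hk

-- target_to_lang resolves the key of every language of the list to that language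
theorem pvTl_self (base : String) (ls : List String) (d : PySem.Dict String String) (lang : String)
    (h : lang ∈ ls ∨ d.get? (base ++ "::" ++ lang) = some lang) :
    (ls.foldl (fun d lang => d.insert (base ++ "::" ++ lang) lang) d).get? (base ++ "::" ++ lang)
      = some lang := by
  induction ls generalizing d with
  | nil => exact h.resolve_left (by simp)
  | cons x rest ih =>
    rw [List.foldl_cons]
    refine ih _ ?_
    by_cases hx : base ++ "::" ++ lang = base ++ "::" ++ x
    · right; rw [hx, PySem.Dict.get?_insert_self, pvKeyInj hx]
    · rcases h with h | h
      · rcases List.mem_cons.mp h with h | h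
        · exact absurd (by rw [h]) hx
        · left; exact h
      · right; rw [PySem.Dict.get?_insert_of_ne _ _ hx]; exact h

-- B's header pass, looked up at a language of the list: found[lang] is set from the
-- FIRST header matching base::lang, and only when that cell is in range and truthy
def pvLook (row : List String) (g : Option String) (s : Int) : Option Nat → Option String
  | some n =>
    if (s + (n : Int)) < (row.length : Int) ∧ PySem.List.pyGetD row (s + (n : Int)) "" ≠ "" then
      some (PySem.Str.strip (PySem.List.pyGetD row (s + (n : Int)) ""))
    else g
  | none => g

theorem pvLook_shift (row : List String) (g : Option String) (s : Int) (o : Option Nat) :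
    pvLook row g s (o.map (· + 1)) = pvLook row g (s + 1) o := by
  cases o with
  | none => rfl
  | some n =>
    simp only [Option.map_some, pvLook]
    rw [show s + ((n + 1 : Nat) : Int) = s + 1 + (n : Int) by push_cast; ring]

theorem pvHdrStep_none (row : List String) (tl : PySem.Dict String String)
    (st : PySem.Dict String String × PySem.Set String) (p : Int × String)
    (h : tl.get? (pvNorm p.2) = none) : pvHdrStep row tl st p = st := by
  unfold pvHdrStep; rw [h]

theorem pvHdrStep_seen (row : List String) (tl : PySem.Dict String String)
    (st : PySem.Dict String String × PySem.Set String) (p : Int × String) (l : String)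
    (h : tl.get? (pvNorm p.2) = some l) (h2 : st.2.contains l = true) :
    pvHdrStep row tl st p = st := by
  unfold pvHdrStep; rw [h]; exact if_pos h2

theorem pvHdrStep_new (row : List String) (tl : PySem.Dict String String)
    (st : PySem.Dict String String × PySem.Set String) (p : Int × String) (l : String)
    (h : tl.get? (pvNorm p.2) = some l) (h2 : st.2.contains l = false) :
    pvHdrStep row tl st p =
      (if p.1 < (row.length : Int) ∧ PySem.List.pyGetD row p.1 "" ≠ "" then
         st.1.insert l (PySem.Str.strip (PySem.List.pyGetD row p.1 ""))
       else st.1,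
       PySem.Set.add st.2 l) := by
  unfold pvHdrStep; rw [h]; exact if_neg (by rw [h2]; simp)

theorem pvHdr_found (row : List String) (base : String) (languages : List String)
    (lang : String) (hmem : lang ∈ languages)
    (hs : List String) (s : Int) (found : PySem.Dict String String) (res : PySem.Set String) :
    (((PySem.List.enumerate hs s).foldl
        (pvHdrStep row (languages.foldl
          (fun d lang => d.insert (base ++ "::" ++ lang) lang) PySem.Dict.empty))
        (found, res)).1.get? lang) =
      (if res.contains lang then found.get? lang
       else pvLook row (found.get? lang) s
         (PySem.List.index? (hs.map pvNorm) (base ++ "::" ++ lang))) := by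
  set tl := languages.foldl (fun d lang => d.insert (base ++ "::" ++ lang) lang)
    PySem.Dict.empty with htl
  have hsound : ∀ k l, tl.get? k = some l → k = base ++ "::" ++ l :=
    pvTl_sound base languages PySem.Dict.empty (by simp [PySem.Dict.get?_empty])
  have hself : tl.get? (base ++ "::" ++ lang) = some lang :=
    pvTl_self base languages PySem.Dict.empty lang (Or.inl hmem)
  clear htl hmem
  induction hs generalizing s found res with
  | nil =>
    rw [PySem.List.enumerate_nil, List.foldl_nil, List.map_nil]
    rw [PySem.List.index?_eq_idxOf?]
    simp [pvLook]
  | cons x rest ih =>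
    rw [PySem.List.enumerate_cons, List.foldl_cons, List.map_cons]
    cases hget : tl.get? (pvNorm x) with
    | none =>
      have hne : pvNorm x ≠ base ++ "::" ++ lang := by
        intro h; rw [h, hself] at hget; cases hget
      rw [pvHdrStep_none row tl (found, res) (s, x) hget,
        ih (s + 1) found res, PySem.List.index?_cons_of_ne _ hne, pvLook_shift]
    | some l =>
      have hx : pvNorm x = base ++ "::" ++ l := hsound _ _ hget
      by_cases hres : res.contains l = true
      · rw [pvHdrStep_seen row tl (found, res) (s, x) l hget hres, ih (s + 1) found res]
        by_cases hl : l = lang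
        · subst hl; rw [if_pos hres, if_pos hres]
        · have hne : pvNorm x ≠ base ++ "::" ++ lang := by
            rw [hx]; intro h; exact hl (pvKeyInj h)
          rw [PySem.List.index?_cons_of_ne _ hne, pvLook_shift]
      · rw [pvHdrStep_new row tl (found, res) (s, x) l hget (by simpa using hres),
          ih (s + 1) _ _]
        dsimp only
        by_cases hl : l = lang
        · subst hl
          have hresadd : (PySem.Set.add res l).contains l = true := by
            rw [PySem.Set.contains_iff, PySem.Set.mem_add]; right; rfl
          rw [if_pos hresadd, if_neg hres, hx, PySem.List.index?_cons_self]
          simp only [pvLook]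
          rw [show s + ((0 : Nat) : Int) = s by push_cast; ring]
          split
          · rw [PySem.Dict.get?_insert_self]
          · rfl
        · have hresadd : (PySem.Set.add res l).contains lang = res.contains lang := by
            rw [Bool.eq_iff_iff, PySem.Set.contains_iff, PySem.Set.contains_iff,
              PySem.Set.mem_add]
            exact or_iff_left (fun h => hl h.symm)
          have hfound : (if s < (row.length : Int) ∧ PySem.List.pyGetD row s "" ≠ "" then
               found.insert l (PySem.Str.strip (PySem.List.pyGetD row s ""))
             else found).get? lang = found.get? lang := by
            split
            · rw [PySem.Dict.get?_insert_of_ne _ _ (fun h => hl h.symm)]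
            · rfl
          have hne : pvNorm x ≠ base ++ "::" ++ lang := by
            rw [hx]; intro h; exact hl (pvKeyInj h)
          rw [hresadd, hfound, PySem.List.index?_cons_of_ne _ hne, pvLook_shift]

-- A's per-language "membership scan + .index() scan" step, through found's characterisation
theorem pvAStep_eq (row : List String) (hl : List String) (c k : String)
    (d : PySem.Dict String String) :
    (if hl.contains c then
      match PySem.List.index? hl c with
      | some idx =>
        if idx < row.length ∧ PySem.List.pyGetD row (idx : Int) "" ≠ "" then
          d.insert k (PySem.Str.strip (PySem.List.pyGetD row (idx : Int) ""))
        else d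
      | none => d
     else d) =
    (match pvLook row none 0 (PySem.List.index? hl c) with
     | some v => d.insert k v
     | none => d) := by
  have hmem : hl.contains c = (PySem.List.index? hl c).isSome := by
    rw [Bool.eq_iff_iff, List.contains_iff_mem, PySem.List.index?_isSome_iff]
  cases hidx : PySem.List.index? hl c with
  | none => simp [pvLook]
  | some n =>
    simp only [hmem, hidx, Option.isSome_some, if_pos, pvLook]
    rw [show (0 : Int) + (n : Int) = (n : Int) by ring]
    have hiff : (n < row.length ∧ PySem.List.pyGetD row (n : Int) "" ≠ "") ↔
        ((n : Int) < (row.length : Int) ∧ PySem.List.pyGetD row (n : Int) "" ≠ "") := by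
      constructor <;> (rintro ⟨h1, h2⟩; exact ⟨by omega, h2⟩)
    rw [if_congr hiff rfl rfl]
    split <;> rfl

-- B's fallback scan is first-match lookup of base_lower among the normalised headers
theorem pvFb_eq (row : List String) (bl : String) (hs : List String) (s : Int) :
    pvFbLoop row bl (PySem.List.enumerate hs s) =
      pvLook row none s (PySem.List.index? (hs.map pvNorm) bl) := by
  induction hs generalizing s with
  | nil =>
    rw [PySem.List.enumerate_nil, PySem.List.index?_eq_idxOf?]
    simp [pvFbLoop, pvLook]
  | cons x rest ih =>
    rw [PySem.List.enumerate_cons, List.map_cons]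
    by_cases hx : pvNorm x = bl
    · rw [show pvFbLoop row bl ((s, x) :: PySem.List.enumerate rest (s + 1)) =
          (if s < (row.length : Int) ∧ PySem.List.pyGetD row s "" ≠ "" then
            some (PySem.Str.strip (PySem.List.pyGetD row s ""))
           else none) by simp [pvFbLoop, hx]]
      rw [hx, PySem.List.index?_cons_self]
      simp only [pvLook]
      rw [show s + ((0 : Nat) : Int) = s by push_cast; ring]
    · rw [show pvFbLoop row bl ((s, x) :: PySem.List.enumerate rest (s + 1)) =
          pvFbLoop row bl (PySem.List.enumerate rest (s + 1)) by simp [pvFbLoop, hx]]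
      rw [ih (s + 1), PySem.List.index?_cons_of_ne _ hx, pvLook_shift]

-- A's base-column fallback step, through the same first-match lookup
theorem pvFbMatch (row : List String) (v : PySem.Dict String String) (o : Option Nat) :
    (match o with
     | some base_idx =>
       if base_idx < row.length ∧ PySem.List.pyGetD row (base_idx : Int) "" ≠ "" then
         v.insert "default" (PySem.Str.strip (PySem.List.pyGetD row (base_idx : Int) ""))
       else v
     | none => v) =
    (match pvLook row none 0 o with
     | some w => v.insert "default" w
     | none => v) := by
  cases o with
  | none => rfl
  | some n =>
    simp only [pvLook]
    rw [show (0 : Int) + (n : Int) = (n : Int) by ring]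
    have hiff : (n < row.length ∧ PySem.List.pyGetD row (n : Int) "" ≠ "") ↔
        ((n : Int) < (row.length : Int) ∧ PySem.List.pyGetD row (n : Int) "" ≠ "") := by
      constructor <;> (rintro ⟨h1, h2⟩; exact ⟨by omega, h2⟩)
    rw [if_congr hiff rfl rfl]
    split <;> rfl

-- ===== VERDICT (by name: the statement is the Claim_ definition above) =====
theorem get_localized_values_spec : Claim_equal_get_localized_values := by
  intro row headers base_name languages hdom
  clear hdom
  unfold Spec_get_localized_values get_localized_values get_localized_values_alt
  simp only []
  have hfound : ∀ lang ∈ languages,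
      (((PySem.List.enumerate headers 0).foldl
        (pvHdrStep row (languages.foldl
          (fun d lang => d.insert (base_name ++ "::" ++ lang) lang) PySem.Dict.empty))
        (PySem.Dict.empty, PySem.Set.empty)).1.get? lang) =
      pvLook row none 0
        (PySem.List.index? (headers.map pvNorm) (base_name ++ "::" ++ lang)) := by
    intro lang hmem
    rw [pvHdr_found row base_name languages lang hmem headers 0 PySem.Dict.empty
      PySem.Set.empty]
    rw [if_neg (by simp [PySem.Set.empty]),
      PySem.Dict.get?_empty]
  have hvals : languages.foldl (fun values lang =>
      let col_name := base_name ++ "::" ++ lang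
      if (headers.map pvNorm).contains col_name then
        match PySem.List.index? (headers.map pvNorm) col_name with
        | some idx =>
          if idx < row.length ∧ PySem.List.pyGetD row (idx : Int) "" ≠ "" then
            values.insert lang (PySem.Str.strip (PySem.List.pyGetD row (idx : Int) ""))
          else values
        | none => values
      else values) PySem.Dict.empty =
    languages.foldl (fun d lang =>
      match (((PySem.List.enumerate headers 0).foldl
        (pvHdrStep row (languages.foldl
          (fun d lang => d.insert (base_name ++ "::" ++ lang) lang) PySem.Dict.empty))
        (PySem.Dict.empty, PySem.Set.empty)).1.get? lang) with
      | some v => d.insert lang v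
      | none => d) PySem.Dict.empty := by
    apply PySem.List.foldl_congr_mem
    intro d lang hmem
    rw [hfound lang hmem]
    exact pvAStep_eq row (headers.map pvNorm) (base_name ++ "::" ++ lang) lang d
  rw [hvals]
  congr 1
  split
  · have hmem : (headers.map pvNorm).contains (PySem.Str.lower base_name) =
        (PySem.List.index? (headers.map pvNorm) (PySem.Str.lower base_name)).isSome := by
      rw [Bool.eq_iff_iff, List.contains_iff_mem, PySem.List.index?_isSome_iff]
    have hgci : get_column_index headers [base_name] =
        PySem.List.index? (headers.map pvNorm) (PySem.Str.lower base_name) := by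
      unfold get_column_index
      rw [show pvGciLoop (headers.map pvNorm) [base_name] =
            (if (headers.map pvNorm).contains (PySem.Str.lower base_name) then
              PySem.List.index? (headers.map pvNorm) (PySem.Str.lower base_name)
             else pvGciLoop (headers.map pvNorm) []) from rfl]
      rw [hmem]
      cases hidx : PySem.List.index? (headers.map pvNorm) (PySem.Str.lower base_name) with
      | none => simp [pvGciLoop]
      | some n => simp
    rw [hgci, pvFb_eq row (PySem.Str.lower base_name) headers 0, pvFbMatch]
  · rfl
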